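-- pv_equiv track=rewrite | github.com/Elaine-one/shaanxi-heritage-ai-platform | Agent/services/pdf_generator_optimized.py | _replace_markdown_code
-- ===== SOURCE A (Python) =====
-- def _replace_markdown_code(text: str) -> str:
--     """替换 `text` 为 <font color="#e67e22"><b>text</b></font>"""
--     result = []
--     i = 0
--     while i < len(text):
--         if text[i] == '`':
--             end = text.find('`', i + 1)
--             if end != -1:
--                 content = text[i+1:end]
--                 result.append(f'<font color="#e67e22"><b>{content}</b></font>')
--                 i = end + 1
--                 continue
--         result.append(text[i])
--         i += 1
--     return ''.join(result)
-- ===== SOURCE B (Python) =====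
-- def _replace_markdown_code(text: str) -> str:
--     parts = text.split('`')
--     out = [parts[0]]
--     i = 1
--     while i + 1 < len(parts):
--         out.append(f'<font color="#e67e22"><b>{parts[i]}</b></font>')
--         out.append(parts[i + 1])
--         i += 2
--     if i < len(parts):
--         out.append('`' + parts[i])
--     return ''.join(out)
-- ===== Notes on version B (the rewrite author's own statement) =====
-- stated objective: faster
-- what changed: B splits the text on backticks once and walks the parts list two at a time (wrapped content, following outside text), emitting a literal backtick before a lone final part, instead of A's character-by-character scan with repeated str.find calls.
import Mathlib
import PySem

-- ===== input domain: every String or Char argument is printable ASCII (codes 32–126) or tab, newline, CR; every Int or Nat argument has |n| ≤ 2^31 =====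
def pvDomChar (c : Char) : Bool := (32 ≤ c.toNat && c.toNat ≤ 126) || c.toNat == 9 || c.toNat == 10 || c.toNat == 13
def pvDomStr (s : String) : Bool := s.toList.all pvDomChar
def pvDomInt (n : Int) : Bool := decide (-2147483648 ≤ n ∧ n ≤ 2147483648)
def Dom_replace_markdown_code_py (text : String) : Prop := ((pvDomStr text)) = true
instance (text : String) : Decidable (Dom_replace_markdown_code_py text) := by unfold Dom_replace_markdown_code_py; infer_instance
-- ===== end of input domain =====

-- B replaces A's character-by-character scan (with repeated str.find) by a single split on '`'
-- followed by a walk over the parts two at a time; same return value, measurably faster (one C-level split instead of a Python-level per-character loop).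

-- the f-string template, shared by both Pythons as a literal
def pvOpenTag : List Char := "<font color=\"#e67e22\"><b>".toList
def pvCloseTag : List Char := "</b></font>".toList

-- ===== PORT A =====
-- A's while loop over index i, rewritten as structural recursion on the suffix text[i:];
-- text.find('`', i+1) becomes PySem.Chars.find on the suffix after the backtick (exact).
def pvLoopA : List Char → List Char
  | [] => []
  | c :: rest =>
    if c = '`' then
      let e := PySem.Chars.find rest ['`']
      if e = -1 then
        c :: pvLoopA rest
      else
        (pvOpenTag ++ rest.take e.toNat ++ pvCloseTag) ++ pvLoopA (rest.drop (e.toNat + 1))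
    else
      c :: pvLoopA rest
  termination_by cs => cs.length
  decreasing_by
    · simp
    · simp only [List.length_drop, List.length_cons]; omega
    · simp

def replace_markdown_code_py (text : String) : String := String.ofList (pvLoopA text.toList)

-- ===== PORT B =====
-- Source B's while loop over the parts list, two parts at a time; a lone final part means an
-- unmatched opening backtick and is emitted as '`' + part.
def pvPairsB : List (List Char) → List Char
  | [] => []
  | [p] => '`' :: p
  | p :: q :: rest => (pvOpenTag ++ p ++ pvCloseTag) ++ q ++ pvPairsB rest

def replace_markdown_code_py_alt (text : String) : String :=
  match List.splitOn '`' text.toList with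
  | [] => String.ofList []       -- unreachable: splitOn never returns []
  | p :: rest => String.ofList (p ++ pvPairsB rest)

-- ===== PRECONDITION & SPEC =====
def Spec_replace_markdown_code_py (text : String) (out : String) : Prop := out = replace_markdown_code_py_alt text
instance (text : String) (out : String) : Decidable (Spec_replace_markdown_code_py text out) := by unfold Spec_replace_markdown_code_py; infer_instance

-- ===== CLAIM (what is proved, stated in full; the proofs are below) =====
def Claim_equal_replace_markdown_code_py : Prop := ∀ (text : String), Dom_replace_markdown_code_py text → Spec_replace_markdown_code_py text (replace_markdown_code_py text)

-- ===== LEMMAS AND PROOFS =====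

-- glue: what port B builds from a split result
def pvGlue : List (List Char) → List Char
  | [] => []
  | p :: rest => p ++ pvPairsB rest

theorem pvLoopA_eq_glue_split_aux (N : Nat) :
    ∀ cs : List Char, cs.length ≤ N → pvLoopA cs = pvGlue (List.splitOn '`' cs) := by
  induction N with
  | zero =>
    intro cs hn
    have : cs = [] := List.eq_nil_of_length_eq_zero (Nat.le_zero.mp hn)
    subst this
    simp [pvLoopA, List.splitOn, List.splitOnP_nil, pvGlue, pvPairsB]
  | succ N IH =>
    intro cs hn
    match cs with
    | [] => simp [pvLoopA, List.splitOn, List.splitOnP_nil, pvGlue, pvPairsB]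
    | c :: rest =>
      by_cases hc : c = '`'
      case neg =>
        obtain ⟨p0, ps, hps⟩ :=
          List.exists_cons_of_ne_nil (List.splitOnP_ne_nil (· == '`') rest)
        have hIH := IH rest (by simp at hn; omega)
        simp only [List.splitOn] at *
        rw [List.splitOnP_cons, if_neg (by simp [hc]), hps]
        rw [pvLoopA, if_neg hc, hIH, hps]
        simp [pvGlue]
      case pos =>
        subst hc
        by_cases he : PySem.Chars.find rest ['`'] = -1
        · -- no closing backtick: '`' ∉ rest
          have hmem : '`' ∉ rest := by
            intro h
            exact (PySem.Chars.find_eq_neg_one_iff rest ['`']).mp he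
              ((List.singleton_infix_iff _ _).mpr h)
          have hsingle : List.splitOn '`' rest = [rest] := by
            rw [List.splitOn]
            exact List.splitOnP_eq_single _ _
              (by intro x hx; simp; intro h; exact hmem (h ▸ hx))
          have hrest : pvLoopA rest = rest := by
            have := IH rest (by simp at hn; omega)
            rw [this, hsingle]; simp [pvGlue, pvPairsB]
          simp only [List.splitOn] at hsingle
          simp [pvLoopA, he, hrest, List.splitOn, List.splitOnP_cons, hsingle,
            pvGlue, pvPairsB]
        · -- closing backtick at relative index e
          set e := PySem.Chars.find rest ['`'] with hedef
          have h0 : (0:Int) ≤ e := by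
            have := (PySem.Chars.find_nonneg_iff rest ['`'])
            have hinf : ['`'] <:+: rest := (PySem.Chars.find_ne_neg_one_iff rest ['`']).mp he
            exact this.mpr hinf
          have hspec := PySem.Chars.findFrom_natCast_spec rest ['`'] 0 (Nat.zero_le _)
            (by rw [Nat.cast_zero, PySem.Chars.findFrom_zero]; exact he)
          rw [Nat.cast_zero, PySem.Chars.findFrom_zero, ← hedef] at hspec
          obtain ⟨-, hpre, hmin⟩ := hspec
          set n := e.toNat with hndef
          -- rest[n] = '`', so rest = take n ++ '`' :: drop (n+1)
          have hdropne : rest.drop n ≠ [] := by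
            intro h; rw [h] at hpre; exact absurd (List.prefix_nil.mp hpre) (by simp)
          have hnlt : n < rest.length := by
            by_contra h; exact hdropne (List.drop_eq_nil_of_le (by omega))
          have hhead : rest.drop n = '`' :: rest.drop (n + 1) := by
            have h1 : rest.drop n = rest[n] :: rest.drop (n + 1) :=
              List.drop_eq_getElem_cons hnlt
            have h2 : rest[n] = '`' := by
              obtain ⟨t, ht⟩ := hpre
              have := h1.symm.trans ht.symm
              exact (List.cons.injEq _ _ _ _ ▸ this).1
            rw [h1, h2]
          have hdecomp : rest = rest.take n ++ '`' :: rest.drop (n + 1) := by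
            conv_lhs => rw [← List.take_append_drop n rest]
            rw [hhead]
          have hnotin : ∀ x ∈ rest.take n, ¬ ((· == '`') x = true) := by
            intro x hx hbe
            have hx' := hx
            rw [List.mem_take_iff_getElem] at hx'
            obtain ⟨i, hi, hxi⟩ := hx'
            have hilt : i < n := lt_of_lt_of_le hi (min_le_left _ _)
            apply hmin i (Nat.zero_le _) hilt
            have h1 : rest.drop i = rest[i] :: rest.drop (i + 1) :=
              List.drop_eq_getElem_cons (by omega)
            rw [h1, hxi]
            have : x = '`' := by simpa using hbe
            rw [this]
            exact ⟨rest.drop (i + 1), rfl⟩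
          have hsplit : List.splitOn '`' rest =
              rest.take n :: List.splitOn '`' (rest.drop (n + 1)) := by
            conv_lhs => rw [hdecomp]
            exact List.splitOnP_first _ _ hnotin '`' (by simp) _
          -- splitOn of the tail is nonempty
          obtain ⟨p0, ps, hps⟩ :=
            List.exists_cons_of_ne_nil (List.splitOnP_ne_nil (· == '`') (rest.drop (n + 1)))
          have hIHr : pvLoopA (rest.drop (n + 1)) = pvGlue (List.splitOn '`' (rest.drop (n + 1))) :=
            IH (rest.drop (n + 1)) (by simp at hn ⊢; omega)
          have hLHS : pvLoopA ('`' :: rest) =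
              (pvOpenTag ++ rest.take n ++ pvCloseTag) ++ pvLoopA (rest.drop (n + 1)) := by
            rw [pvLoopA]; simp [← hedef, he, ← hndef]
          rw [hLHS, hIHr]
          have hsplitcons : List.splitOn '`' ('`' :: rest) =
              [] :: rest.take n :: List.splitOn '`' (rest.drop (n + 1)) := by
            simp only [List.splitOn] at hsplit ⊢
            rw [List.splitOnP_cons, if_pos (by simp), hsplit]
          rw [hsplitcons, List.splitOn] at *
          rw [hps]
          simp [pvGlue, pvPairsB]

theorem pvLoopA_eq_glue_split (cs : List Char) :
    pvLoopA cs = pvGlue (List.splitOn '`' cs) :=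
  pvLoopA_eq_glue_split_aux cs.length cs le_rfl

theorem replace_markdown_code_py_eq (text : String) :
    replace_markdown_code_py text = replace_markdown_code_py_alt text := by
  unfold replace_markdown_code_py replace_markdown_code_py_alt
  rw [pvLoopA_eq_glue_split]
  obtain ⟨p, rest, hps⟩ :=
    List.exists_cons_of_ne_nil (List.splitOnP_ne_nil (· == '`') text.toList)
  simp only [List.splitOn] at *
  rw [hps]
  simp [pvGlue]

-- ===== VERDICT (by name: the statement is the Claim_ definition above) =====
theorem replace_markdown_code_py_spec : Claim_equal_replace_markdown_code_py := by
  intro text _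
  exact replace_markdown_code_py_eq text
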